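-- pv_equiv track=rewrite | github.com/obukhalov/hacker_rank | KnightL_on_a_Chessboard.py | knightlOnAChessboard
-- ===== SOURCE A (Python) =====
-- def knightlOnAChessboard(n):
--     # Write your code here
--
--     # Find the shortest path down the tree from (0,0) to (n-1,n-1). Use BFS.
--     result = []
--
--     for a in range(1, n):
--         sub_result = []
--
--         for b in range(1, n):
--             # I will try to solve the problem as a tree.
--             # visited_cells is a dictionary where key - cell, value - True/False. (False means that cell is already visited)
--             # cell_weight is a dictionary where key - cell, value - cost from root (0,0) to that cell.
--             visited_cells = {}
--             cell_weight = {}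
--
--             for i in range(n):
--
--                 for j in range(n):
--                     visited_cells[(i, j)] = True
--                     cell_weight[(i, j)] = 0
--
--             # BFS
--             root = (0, 0)
--             queue = [root]
--             visited_cells[root] = False
--
--             while len(queue) > 0:
--                 x, y = queue.pop(0)
--                 parent = (x, y)
--
--                 nbrs = [
--                     (x + a, y + b),
--                     (x - a, y + b),
--                     (x + a, y - b),
--                     (x - a, y - b),
--                     (x + b, y + a),
--                     (x - b, y + a),
--                     (x + b, y - a),
--                     (x - b, y - a),
--                 ]
--
--                 for nx, ny in nbrs:
--
--                     if (0 <= nx <= n - 1) and (0 <= ny <= n - 1):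
--                         child = (nx, ny)
--
--                         if visited_cells[child] == True:
--                             queue.append(child)
--                             visited_cells[child] = False
--                             cell_weight[child] = cell_weight[parent] + 1
--
--                             if child == (n - 1, n - 1):
--                                 sub_result.append(cell_weight[child])
--                                 break
--
--             if cell_weight[(n - 1, n - 1)] == 0:
--                 sub_result.append(-1)
--
--         result.append(sub_result)
--
--     return result
-- ===== SOURCE B (Python) =====
-- def knightlOnAChessboard(n):
--     # Level-synchronous BFS: keep only the current frontier set, a visited set
--     # and a depth counter -- no preinitialized per-cell dicts, no FIFO queue.
--     target = (n - 1, n - 1)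
--     result = []
--     for a in range(1, n):
--         row = []
--         for b in range(1, n):
--             frontier = {(0, 0)}
--             visited = {(0, 0)}
--             d = 0
--             ans = -1
--             while frontier:
--                 if target in frontier:
--                     ans = d
--                     break
--                 nxt = set()
--                 for (x, y) in frontier:
--                     for (nx, ny) in ((x + a, y + b), (x - a, y + b),
--                                      (x + a, y - b), (x - a, y - b),
--                                      (x + b, y + a), (x - b, y + a),
--                                      (x + b, y - a), (x - b, y - a)):
--                         if 0 <= nx < n and 0 <= ny < n and (nx, ny) not in visited:
--                             nxt.add((nx, ny))
--                 visited |= nxt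
--                 frontier = nxt
--                 d += 1
--             row.append(ans)
--         result.append(row)
--     return result
-- ===== Notes on version B (the rewrite author's own statement) =====
-- stated objective: alternative
-- what changed: Replaced A's node-by-node FIFO-queue BFS (with per-pair preinitialized full-board visited/weight dicts and list.pop(0)) by a level-synchronous BFS that maintains only the growing frontier set, a visited set and a scalar depth counter.
import Mathlib
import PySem

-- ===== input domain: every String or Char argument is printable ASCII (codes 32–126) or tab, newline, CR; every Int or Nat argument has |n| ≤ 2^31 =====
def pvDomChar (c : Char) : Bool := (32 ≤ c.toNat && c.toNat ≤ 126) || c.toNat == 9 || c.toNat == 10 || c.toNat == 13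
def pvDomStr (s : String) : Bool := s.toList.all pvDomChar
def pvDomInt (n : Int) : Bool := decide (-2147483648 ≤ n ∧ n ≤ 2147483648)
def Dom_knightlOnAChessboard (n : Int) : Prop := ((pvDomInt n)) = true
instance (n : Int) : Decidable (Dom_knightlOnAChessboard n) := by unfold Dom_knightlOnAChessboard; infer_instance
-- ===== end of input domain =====

-- B replaces A's node-by-node FIFO-queue BFS (with full-board visited/weight dicts
-- preinitialized per (a,b) pair) by a level-synchronous BFS keeping only a frontier set,
-- a visited set and a depth counter.

-- ===== PORT A =====

-- the eight KnightL moves from (x, y), in A's order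
def movesA (a b x y : Int) : List (Int × Int) :=
  [(x + a, y + b), (x - a, y + b), (x + a, y - b), (x - a, y - b),
   (x + b, y + a), (x - b, y + a), (x + b, y - a), (x - b, y - a)]

structure AState where
  q : List (Int × Int)
  vd : PySem.Dict (Int × Int) Bool
  wd : PySem.Dict (Int × Int) Int
  acc : List Int
deriving Repr

-- the body of A's 'for nx, ny in nbrs' loop (with its early 'break' on the target)
def procNbrs (n : Int) (parent : Int × Int) (target : Int × Int) :
    List (Int × Int) → AState → AState
  | [], s => s
  | c :: rest, s =>
    if 0 ≤ c.1 ∧ c.1 ≤ n - 1 ∧ 0 ≤ c.2 ∧ c.2 ≤ n - 1 then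
      if s.vd.getD c false = true then
        let q' := s.q ++ [c]
        let vd' := s.vd.insert c false
        let wd' := s.wd.insert c (s.wd.getD parent 0 + 1)
        if c = target then
          -- sub_result.append(cell_weight[child]); break
          ⟨q', vd', wd', s.acc ++ [wd'.getD c 0]⟩
        else procNbrs n parent target rest ⟨q', vd', wd', s.acc⟩
      else procNbrs n parent target rest s
    else procNbrs n parent target rest s

-- A's 'while len(queue) > 0' loop (fuel guard only makes the recursion total)
def runA (n a b : Int) (target : Int × Int) : Nat → AState → AState
  | 0, s => s
  | f + 1, s =>
    match s.q with
    | [] => s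
    | c :: rest =>
      runA n a b target f (procNbrs n c target (movesA a b c.1 c.2) { s with q := rest })

-- visited_cells preinitialization: all cells True
def vInit (n : Int) : PySem.Dict (Int × Int) Bool :=
  (PySem.List.pyRange 0 n 1).foldl
    (fun d i => (PySem.List.pyRange 0 n 1).foldl (fun d' j => d'.insert (i, j) true) d)
    PySem.Dict.empty

-- cell_weight preinitialization: all cells 0
def wInit (n : Int) : PySem.Dict (Int × Int) Int :=
  (PySem.List.pyRange 0 n 1).foldl
    (fun d i => (PySem.List.pyRange 0 n 1).foldl (fun d' j => d'.insert (i, j) 0) d)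
    PySem.Dict.empty

-- one (a, b) round of A's inner 'for b' body: the elements it appends to sub_result
def innerA (n a b : Int) : List Int :=
  let target : Int × Int := (n - 1, n - 1)
  let s := runA n a b target (9 * n.toNat * n.toNat + 2)
    ⟨[((0 : Int), (0 : Int))], (vInit n).insert ((0 : Int), (0 : Int)) false, wInit n, []⟩
  s.acc ++ (if s.wd.getD target 0 = 0 then [-1] else [])

def knightlOnAChessboard (n : Int) : List (List Int) :=
  (PySem.List.pyRange 1 n 1).map (fun a =>
    (PySem.List.pyRange 1 n 1).foldl (fun sub b => sub ++ innerA n a b) [])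

-- ===== PORT B =====

def movesB (a b x y : Int) : List (Int × Int) :=
  [(x + a, y + b), (x - a, y + b), (x + a, y - b), (x - a, y - b),
   (x + b, y + a), (x - b, y + a), (x + b, y - a), (x - b, y - a)]

-- nxt = all in-bounds unvisited knight-neighbours of the frontier
def buildNxt (n a b : Int) (frontier visited : PySem.Set (Int × Int)) :
    PySem.Set (Int × Int) :=
  frontier.foldl
    (fun nxt c =>
      (movesB a b c.1 c.2).foldl
        (fun nxt' d =>
          if 0 ≤ d.1 ∧ d.1 < n ∧ 0 ≤ d.2 ∧ d.2 < n ∧ d ∉ visited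
          then PySem.Set.add nxt' d else nxt')
        nxt)
    PySem.Set.empty

-- B's 'while frontier' loop (fuel guard only makes the recursion total)
def runB (n a b : Int) (target : Int × Int) :
    Nat → PySem.Set (Int × Int) → PySem.Set (Int × Int) → Int → Int
  | 0, _, _, _ => -1
  | f + 1, frontier, visited, d =>
    if frontier = [] then -1
    else if target ∈ frontier then d
    else
      let nxt := buildNxt n a b frontier visited
      runB n a b target f nxt (PySem.Set.union visited nxt) (d + 1)

def innerB (n a b : Int) : Int :=
  runB n a b (n - 1, n - 1) (n.toNat * n.toNat + 2)
    (PySem.Set.ofList [((0 : Int), (0 : Int))])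
    (PySem.Set.ofList [((0 : Int), (0 : Int))]) 0

def knightlOnAChessboard_alt (n : Int) : List (List Int) :=
  (PySem.List.pyRange 1 n 1).map (fun a =>
    (PySem.List.pyRange 1 n 1).map (fun b => innerB n a b))

-- ===== PRECONDITION & SPEC =====
def Spec_knightlOnAChessboard (n : Int) (out : List (List Int)) : Prop := out = knightlOnAChessboard_alt n
instance (n : Int) (out : List (List Int)) : Decidable (Spec_knightlOnAChessboard n out) := by unfold Spec_knightlOnAChessboard; infer_instance

-- ===== CLAIM (what is proved, stated in full; the proofs are below) =====
def Claim_equal_knightlOnAChessboard : Prop := ∀ (n : Int), Dom_knightlOnAChessboard n → Spec_knightlOnAChessboard n (knightlOnAChessboard n)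


-- ===== LEMMAS AND PROOFS =====

-- in-bounds predicate (B's literal bounds test; A's '≤ n-1' form is converted by omega)
def validC (n : Int) (c : Int × Int) : Prop := 0 ≤ c.1 ∧ c.1 < n ∧ 0 ≤ c.2 ∧ c.2 < n

-- all board cells, as a list of length n.toNat * n.toNat
def boardList (n : Int) : List (Int × Int) :=
  (PySem.List.pyRange 0 n 1).flatMap
    (fun i => (PySem.List.pyRange 0 n 1).map (fun j => (i, j)))

lemma mem_boardList (n : Int) (c : Int × Int) : c ∈ boardList n ↔ validC n c := by
  obtain ⟨x, y⟩ := c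
  simp only [boardList, List.mem_flatMap, List.mem_map, PySem.List.mem_pyRange_one, validC,
    Prod.mk.injEq]
  constructor
  · rintro ⟨i, hi, j, hj, rfl, rfl⟩
    exact ⟨hi.1, hi.2, hj.1, hj.2⟩
  · rintro ⟨h1, h2, h3, h4⟩
    exact ⟨x, ⟨h1, h2⟩, y, ⟨h3, h4⟩, rfl, rfl⟩

lemma length_boardList (n : Int) : (boardList n).length = n.toNat * n.toNat := by
  simp [boardList, List.length_flatMap, PySem.List.length_pyRange_one,
    Function.comp_def, PySem.List.length_pyRange_one]

lemma foldl_flatMap_eq {α β σ : Type} (f : α → List β) (g : σ → β → σ) :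
    ∀ (l : List α) (init : σ),
      (l.flatMap f).foldl g init = l.foldl (fun acc x => (f x).foldl g acc) init := by
  intro l
  induction l with
  | nil => intro init; simp
  | cons a l ih => intro init; simp [List.foldl_append, ih]

lemma getD_foldl_insert_const {ν : Type} (v dflt : ν) (c : Int × Int) :
    ∀ (l : List (Int × Int)) (d : PySem.Dict (Int × Int) ν),
      (l.foldl (fun d' x => d'.insert x v) d).getD c dflt
        = if c ∈ l then v else d.getD c dflt := by
  intro l
  induction l with
  | nil => intro d; simp
  | cons a l ih =>
    intro d
    simp only [List.foldl_cons, ih]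
    by_cases h1 : c ∈ l
    · simp [h1]
    · by_cases h2 : c = a
      · simp [h1, h2, PySem.Dict.getD_insert]
      · simp [h1, h2, PySem.Dict.getD_insert]

lemma vInit_getD (n : Int) (c : Int × Int) (hc : validC n c) :
    (vInit n).getD c false = true := by
  have h : vInit n = (boardList n).foldl (fun d' x => d'.insert x true) PySem.Dict.empty := by
    rw [vInit, boardList, foldl_flatMap_eq]
    congr 1; funext d i
    rw [List.foldl_map]
  rw [h, getD_foldl_insert_const]
  simp [mem_boardList, hc]

lemma wInit_getD (n : Int) (c : Int × Int) : (wInit n).getD c 0 = 0 := by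
  have h : wInit n = (boardList n).foldl (fun d' x => d'.insert x (0 : Int)) PySem.Dict.empty := by
    rw [wInit, boardList, foldl_flatMap_eq]
    congr 1; funext d i
    rw [List.foldl_map]
  rw [h, getD_foldl_insert_const]
  split_ifs <;> simp


-- ===== B-side loop characterization =====

lemma foldl_add_guard (n : Int) (V : List (Int × Int)) :
    ∀ (L s : List (Int × Int)), s.Nodup →
      (L.foldl (fun t d => if 0 ≤ d.1 ∧ d.1 < n ∧ 0 ≤ d.2 ∧ d.2 < n ∧ d ∉ V
          then PySem.Set.add t d else t) s).Nodup ∧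
      (∀ c, c ∈ L.foldl (fun t d => if 0 ≤ d.1 ∧ d.1 < n ∧ 0 ≤ d.2 ∧ d.2 < n ∧ d ∉ V
          then PySem.Set.add t d else t) s
        ↔ c ∈ s ∨ (c ∈ L ∧ validC n c ∧ c ∉ V)) := by
  intro L
  induction L with
  | nil => intro s hs; simpa using hs
  | cons d L ih =>
    intro s hs
    simp only [List.foldl_cons]
    by_cases hd : 0 ≤ d.1 ∧ d.1 < n ∧ 0 ≤ d.2 ∧ 0 ≤ d.2 ∧ d.2 < n ∧ d ∉ V
    all_goals {
      first
      | (rw [if_pos (by tauto)]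
         obtain ⟨ihn, ihm⟩ := ih (PySem.Set.add s d) (PySem.Set.nodup_add s d hs)
         refine ⟨ihn, fun c => ?_⟩
         rw [ihm c, PySem.Set.mem_add]
         constructor
         · rintro ((h | rfl) | h)
           · exact Or.inl h
           · exact Or.inr ⟨List.mem_cons_self, ⟨hd.1, hd.2.1, hd.2.2.1, hd.2.2.2.2.1⟩, hd.2.2.2.2.2⟩
           · exact Or.inr ⟨List.mem_cons_of_mem _ h.1, h.2⟩
         · rintro (h | ⟨hm, hv, hnv⟩)
           · exact Or.inl (Or.inl h)
           · rcases List.mem_cons.mp hm with rfl | hm'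
             · exact Or.inl (Or.inr rfl)
             · exact Or.inr ⟨hm', hv, hnv⟩)
      | (rw [if_neg (by unfold validC at *; tauto)]
         obtain ⟨ihn, ihm⟩ := ih s hs
         refine ⟨ihn, fun c => ?_⟩
         rw [ihm c]
         constructor
         · rintro (h | h)
           · exact Or.inl h
           · exact Or.inr ⟨List.mem_cons_of_mem _ h.1, h.2⟩
         · rintro (h | ⟨hm, hv, hnv⟩)
           · exact Or.inl h
           · rcases List.mem_cons.mp hm with rfl | hm'
             · exact absurd ⟨hv.1, hv.2.1, hv.2.2.1, hv.2.2.1, hv.2.2.2, hnv⟩ hd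
             · exact Or.inr ⟨hm', hv, hnv⟩) }

lemma buildNxt_spec (n a b : Int) (F V : PySem.Set (Int × Int)) :
    (buildNxt n a b F V).Nodup ∧
    (∀ c, c ∈ buildNxt n a b F V
      ↔ validC n c ∧ c ∉ V ∧ ∃ p ∈ F, c ∈ movesB a b p.1 p.2) := by
  rw [buildNxt]
  have main : ∀ (Fl s : List (Int × Int)), s.Nodup →
      (Fl.foldl (fun nxt c => (movesB a b c.1 c.2).foldl
        (fun nxt' d => if 0 ≤ d.1 ∧ d.1 < n ∧ 0 ≤ d.2 ∧ d.2 < n ∧ d ∉ V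
          then PySem.Set.add nxt' d else nxt') nxt) s).Nodup ∧
      (∀ c, c ∈ Fl.foldl (fun nxt c => (movesB a b c.1 c.2).foldl
        (fun nxt' d => if 0 ≤ d.1 ∧ d.1 < n ∧ 0 ≤ d.2 ∧ d.2 < n ∧ d ∉ V
          then PySem.Set.add nxt' d else nxt') nxt) s
        ↔ c ∈ s ∨ (validC n c ∧ c ∉ V ∧ ∃ p ∈ Fl, c ∈ movesB a b p.1 p.2)) := by
    intro Fl
    induction Fl with
    | nil => intro s hs; simpa using hs
    | cons p Fl ih =>
      intro s hs
      simp only [List.foldl_cons]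
      obtain ⟨gn, gm⟩ := foldl_add_guard n V (movesB a b p.1 p.2) s hs
      obtain ⟨ihn, ihm⟩ := ih _ gn
      refine ⟨ihn, fun c => ?_⟩
      rw [ihm c, gm c]
      constructor
      · rintro ((h | ⟨hm, hv, hnv⟩) | ⟨hv, hnv, q, hq, hmq⟩)
        · exact Or.inl h
        · exact Or.inr ⟨hv, hnv, p, List.mem_cons_self, hm⟩
        · exact Or.inr ⟨hv, hnv, q, List.mem_cons_of_mem _ hq, hmq⟩
      · rintro (h | ⟨hv, hnv, q, hq, hmq⟩)
        · exact Or.inl (Or.inl h)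
        · rcases List.mem_cons.mp hq with rfl | hq'
          · exact Or.inl (Or.inr ⟨hmq, hv, hnv⟩)
          · exact Or.inr ⟨hv, hnv, q, hq', hmq⟩
  obtain ⟨hn, hm⟩ := main F PySem.Set.empty (by simp [PySem.Set.empty])
  refine ⟨hn, fun c => ?_⟩
  rw [hm c]
  simp [PySem.Set.empty]

lemma union_length {α : Type} [BEq α] [LawfulBEq α] (s t : PySem.Set α)
    (hs : s.Nodup) (ht : t.Nodup) (hdisj : ∀ c ∈ t, c ∉ s) :
    (PySem.Set.union s t).length = s.length + t.length := by
  have hperm : (PySem.Set.union s t).Perm (s ++ t) := by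
    rw [List.perm_ext_iff_of_nodup (PySem.Set.nodup_union s t hs)
      (by rw [List.nodup_append]; exact ⟨hs, ht, fun c hcs b hbt hcb => hdisj b hbt (hcb ▸ hcs)⟩)]
    intro c
    rw [PySem.Set.mem_union, List.mem_append]
  simpa using hperm.length_eq


-- ===== A-side loop characterization =====

-- what one pass of A's neighbour loop does: it enqueues a block 'fresh' of newly
-- discovered cells, marks them visited, gives them weight w(parent)+1, and either
-- breaks on the target (left disjunct) or discovers every discoverable child (right)
lemma procNbrs_spec (n : Int) (target parent : Int × Int) :
    ∀ (L : List (Int × Int)) (s : AState),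
      s.vd.getD parent false = false →
      ∃ fresh : List (Int × Int),
        (procNbrs n parent target L s).q = s.q ++ fresh ∧
        fresh.Nodup ∧
        (∀ c ∈ fresh, c ∈ L ∧ validC n c ∧ s.vd.getD c false = true) ∧
        (∀ c, (procNbrs n parent target L s).vd.getD c false = false ↔
            (s.vd.getD c false = false ∨ c ∈ fresh)) ∧
        (∀ c ∈ fresh, (procNbrs n parent target L s).wd.getD c 0 = s.wd.getD parent 0 + 1) ∧
        (∀ c, c ∉ fresh → (procNbrs n parent target L s).wd.getD c 0 = s.wd.getD c 0) ∧
        ((target ∈ fresh ∧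
            (procNbrs n parent target L s).acc = s.acc ++ [s.wd.getD parent 0 + 1]) ∨
         (target ∉ fresh ∧ (procNbrs n parent target L s).acc = s.acc ∧
            ∀ c ∈ L, validC n c → s.vd.getD c false = true → c ∈ fresh)) := by
  intro L
  induction L with
  | nil =>
    intro s hp
    refine ⟨[], by simp [procNbrs], by simp, by simp, by simp [procNbrs], by simp,
      by simp [procNbrs], Or.inr ⟨by simp, by simp [procNbrs], by simp⟩⟩
  | cons c rest ih =>
    intro s hp
    rw [procNbrs]
    by_cases hb : 0 ≤ c.1 ∧ c.1 ≤ n - 1 ∧ 0 ≤ c.2 ∧ c.2 ≤ n - 1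
    · rw [if_pos hb]
      have hcv : validC n c := ⟨hb.1, by omega, hb.2.2.1, by omega⟩
      by_cases hvd : s.vd.getD c false = true
      · rw [if_pos hvd]
        have hcp : c ≠ parent := fun h => by rw [h, hp] at hvd; exact Bool.false_ne_true hvd
        by_cases htg : c = target
        · rw [if_pos htg]
          refine ⟨[c], by simp, by simp, ?_, ?_, ?_, ?_, Or.inl ⟨by simp [htg], ?_⟩⟩
          · intro x hx
            rw [List.mem_singleton] at hx; subst hx
            exact ⟨List.mem_cons_self, hcv, hvd⟩
          · intro x
            simp only [PySem.Dict.getD_insert, List.mem_singleton]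
            by_cases hxc : x = c <;> simp [hxc]
          · intro x hx
            rw [List.mem_singleton] at hx; subst hx
            simp [PySem.Dict.getD_insert]
          · intro x hx
            rw [List.mem_singleton] at hx
            simp [PySem.Dict.getD_insert, hx]
          · simp [PySem.Dict.getD_insert]
        · rw [if_neg htg]
          set s1 : AState := ⟨s.q ++ [c], s.vd.insert c false,
            s.wd.insert c (s.wd.getD parent 0 + 1), s.acc⟩ with hs1
          have hp1 : s1.vd.getD parent false = false := by
            simp [hs1, PySem.Dict.getD_insert, (Ne.symm hcp), hp]
          obtain ⟨fr, hq, hnd, hmem, hvdi, hwf, hwo, hacc⟩ := ih s1 hp1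
          have hcfr : c ∉ fr := by
            intro hc
            have := (hmem c hc).2.2
            simp [hs1, PySem.Dict.getD_insert] at this
          have hwp1 : s1.wd.getD parent 0 = s.wd.getD parent 0 := by
            simp [hs1, PySem.Dict.getD_insert, Ne.symm hcp]
          refine ⟨c :: fr, ?_, ?_, ?_, ?_, ?_, ?_, ?_⟩
          · rw [hq]; simp [hs1]
          · exact List.nodup_cons.mpr ⟨hcfr, hnd⟩
          · intro x hx
            rcases List.mem_cons.mp hx with rfl | hx'
            · exact ⟨List.mem_cons_self, hcv, hvd⟩
            · obtain ⟨hl, hv, ht⟩ := hmem x hx'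
              have hxc : x ≠ c := by
                intro h; subst h
                simp [hs1] at ht
              refine ⟨List.mem_cons_of_mem _ hl, hv, ?_⟩
              simpa [hs1, PySem.Dict.getD_insert, hxc] using ht
          · intro x
            rw [hvdi x]
            simp only [hs1, PySem.Dict.getD_insert, List.mem_cons]
            by_cases hxc : x = c
            · simp [hxc]
            · simp only [if_neg hxc]; tauto
          · intro x hx
            rcases List.mem_cons.mp hx with rfl | hx'
            · rw [hwo x hcfr]; simp [hs1]
            · rw [hwf x hx', hwp1]
          · intro x hx
            have hxc : x ≠ c := fun h => hx (h ▸ List.mem_cons_self)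
            have hxfr : x ∉ fr := fun h => hx (List.mem_cons_of_mem _ h)
            rw [hwo x hxfr]
            simp [hs1, PySem.Dict.getD_insert, hxc]
          · rcases hacc with ⟨htf, ha⟩ | ⟨htf, ha, hcomp⟩
            · exact Or.inl ⟨List.mem_cons_of_mem _ htf, by rw [ha, hwp1]⟩
            · refine Or.inr ⟨?_, by rw [ha], ?_⟩
              · intro h
                rcases List.mem_cons.mp h with rfl | h'
                · exact htg rfl
                · exact htf h'
              · intro x hxl hxv hxt
                rcases List.mem_cons.mp hxl with rfl | hxl'
                · exact List.mem_cons_self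
                · by_cases hxc : x = c
                  · exact hxc ▸ List.mem_cons_self
                  · refine List.mem_cons_of_mem _ (hcomp x hxl' hxv ?_)
                    simp [hs1, PySem.Dict.getD_insert, hxc, hxt]
      · rw [if_neg hvd]
        obtain ⟨fr, hq, hnd, hmem, hvdi, hwf, hwo, hacc⟩ := ih s hp
        refine ⟨fr, hq, hnd, ?_, hvdi, hwf, hwo, ?_⟩
        · intro x hx
          obtain ⟨hl, hv, ht⟩ := hmem x hx
          exact ⟨List.mem_cons_of_mem _ hl, hv, ht⟩
        · rcases hacc with h | ⟨htf, ha, hcomp⟩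
          · exact Or.inl h
          · refine Or.inr ⟨htf, ha, ?_⟩
            intro x hxl hxv hxt
            rcases List.mem_cons.mp hxl with rfl | hxl'
            · exact absurd hxt hvd
            · exact hcomp x hxl' hxv hxt
    · rw [if_neg hb]
      obtain ⟨fr, hq, hnd, hmem, hvdi, hwf, hwo, hacc⟩ := ih s hp
      refine ⟨fr, hq, hnd, ?_, hvdi, hwf, hwo, ?_⟩
      · intro x hx
        obtain ⟨hl, hv, ht⟩ := hmem x hx
        exact ⟨List.mem_cons_of_mem _ hl, hv, ht⟩
      · rcases hacc with h | ⟨htf, ha, hcomp⟩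
        · exact Or.inl h
        · refine Or.inr ⟨htf, ha, ?_⟩
          intro x hxl hxv hxt
          rcases List.mem_cons.mp hxl with rfl | hxl'
          · exact absurd ⟨hxv.1, by have := hxv.2.1; omega, hxv.2.2.1,
              by have := hxv.2.2.2; omega⟩ hb
          · exact hcomp x hxl' hxv hxt

-- once the target is marked visited, the rest of the run changes neither sub_result
-- nor the target's weight nor its mark
lemma procNbrs_preserve (n : Int) (target parent : Int × Int) :
    ∀ (L : List (Int × Int)) (s : AState),
      s.vd.getD target false = false →
      (procNbrs n parent target L s).acc = s.acc ∧
      (procNbrs n parent target L s).vd.getD target false = false ∧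
      (procNbrs n parent target L s).wd.getD target 0 = s.wd.getD target 0 := by
  intro L
  induction L with
  | nil => intro s ht; simp [procNbrs, ht]
  | cons c rest ih =>
    intro s ht
    rw [procNbrs]
    by_cases hb : 0 ≤ c.1 ∧ c.1 ≤ n - 1 ∧ 0 ≤ c.2 ∧ c.2 ≤ n - 1
    · rw [if_pos hb]
      by_cases hvd : s.vd.getD c false = true
      · rw [if_pos hvd]
        have hct : c ≠ target := fun h => by rw [h, ht] at hvd; exact Bool.false_ne_true hvd
        rw [if_neg hct]
        have ht1 : (AState.mk (s.q ++ [c]) (s.vd.insert c false)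
            (s.wd.insert c (s.wd.getD parent 0 + 1)) s.acc).vd.getD target false = false := by
          simp [PySem.Dict.getD_insert, Ne.symm hct, ht]
        obtain ⟨h1, h2, h3⟩ := ih _ ht1
        refine ⟨by rw [h1], h2, by rw [h3]; simp [PySem.Dict.getD_insert, Ne.symm hct]⟩
      · rw [if_neg hvd]; exact ih s ht
    · rw [if_neg hb]; exact ih s ht

lemma runA_preserve (n a b : Int) (target : Int × Int) :
    ∀ (f : Nat) (s : AState), s.vd.getD target false = false →
      (runA n a b target f s).acc = s.acc ∧
      (runA n a b target f s).wd.getD target 0 = s.wd.getD target 0 ∧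
      (runA n a b target f s).vd.getD target false = false := by
  intro f
  induction f with
  | zero => intro s ht; exact ⟨rfl, rfl, ht⟩
  | succ f ih =>
    intro s ht
    rw [runA]
    cases hq : s.q with
    | nil => exact ⟨rfl, rfl, ht⟩
    | cons c rest =>
      obtain ⟨p1, p2, p3⟩ := procNbrs_preserve n target c (movesA a b c.1 c.2)
        { s with q := rest } ht
      obtain ⟨r1, r2, r3⟩ := ih _ p2
      exact ⟨by rw [r1, p1], by rw [r2, p3], r3⟩

lemma runA_nil (n a b : Int) (target : Int × Int) (f : Nat) (s : AState) (h : s.q = []) :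
    runA n a b target f s = s := by
  cases f with
  | zero => rfl
  | succ f => rw [runA, h]


-- ===== main bisimulation: A's queue run vs B's level run =====

-- Invariant relating A's mid-layer state (queue = rest-of-layer ++ discovered-next-layer,
-- visited/weight dicts) to B's state (frontier F, visited V, depth k); conclusion: A's
-- sub_result contributions for this (a, b) equal B's single answer.
lemma mainInv (n a b : Int) (hn : 2 ≤ n) :
    ∀ (N f fB : Nat) (k : Nat) (P D F V Pd : List (Int × Int)) (s : AState),
      f + fB ≤ N →
      s.q = P ++ D →
      s.acc = [] →
      F ≠ [] →
      F.Nodup → V.Nodup → (P ++ D).Nodup →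
      (∀ c, c ∈ F ↔ (c ∈ Pd ∨ c ∈ P)) →
      (∀ c, ¬(c ∈ Pd ∧ c ∈ P)) →
      (∀ c ∈ F, c ∈ V) →
      (∀ c ∈ V, validC n c) →
      (∀ c, c ∈ D ↔ (validC n c ∧ c ∉ V ∧ ∃ p ∈ Pd, c ∈ movesA a b p.1 p.2)) →
      (∀ c, validC n c → (s.vd.getD c false = false ↔ (c ∈ V ∨ c ∈ D))) →
      (∀ c ∈ P, s.wd.getD c 0 = (k : Int)) →
      (∀ c ∈ D, s.wd.getD c 0 = (k : Int) + 1) →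
      (n - 1, n - 1) ∉ V →
      (n - 1, n - 1) ∉ D →
      s.wd.getD (n - 1, n - 1) 0 = 0 →
      9 * (n.toNat * n.toNat - (V.length + D.length)) + (P ++ D).length ≤ f →
      (n.toNat * n.toNat - V.length) + 2 ≤ fB →
      (runA n a b (n - 1, n - 1) f s).acc
          ++ (if (runA n a b (n - 1, n - 1) f s).wd.getD (n - 1, n - 1) 0 = 0
              then [-1] else [])
        = [runB n a b (n - 1, n - 1) fB F V (k : Int)] := by
  intro N
  induction N with
  | zero =>
    intro f fB k P D F V Pd s hN
    omega
  | succ N ih =>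
    intro f fB k P D F V Pd s hN hsq hsacc hFne hFnd hVnd hPDnd hF hPdP hFV hVval hD hvd
      hwP hwD htV htD htw hfA hfB
    have htval : validC n (n - 1, n - 1) := ⟨by omega, by omega, by omega, by omega⟩
    have htF : (n - 1, n - 1) ∉ F := fun h => htV (hFV _ h)
    obtain ⟨nxtnd, nxtmem⟩ := buildNxt_spec n a b F V
    -- |V| + |D| ≤ n²  (V, D disjoint nodup lists of valid cells)
    have hVDle : V.length + D.length ≤ n.toNat * n.toNat := by
      have hnd : (V ++ D).Nodup := by
        rw [List.nodup_append]
        refine ⟨hVnd, (List.nodup_append.mp hPDnd).2.1, ?_⟩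
        intro c hcV c' hc'D hcc
        exact ((hD c').mp hc'D).2.1 (hcc ▸ hcV)
      have hsub : (V ++ D) ⊆ boardList n := by
        intro c hc
        rcases List.mem_append.mp hc with h | h
        · exact (mem_boardList n c).mpr (hVval c h)
        · exact (mem_boardList n c).mpr ((hD c).mp h).1
      have := (hnd.subperm hsub).length_le
      rw [List.length_append, length_boardList n] at this
      exact this
    cases P with
    | nil =>
      cases D with
      | nil =>
        -- queue empty, frontier's next level empty: both report -1
        have hA : runA n a b (n - 1, n - 1) f s = s :=
          runA_nil n a b _ f s (by simpa using hsq)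
        rw [hA, hsacc, htw]
        have hnxt : buildNxt n a b F V = [] := by
          rw [List.eq_nil_iff_forall_not_mem]
          intro c hc
          obtain ⟨hv, hnV, p, hpF, hpm⟩ := (nxtmem c).mp hc
          rcases (hF p).mp hpF with hPd | hP
          · exact absurd ((hD c).mpr ⟨hv, hnV, p, hPd, hpm⟩) (by simp)
          · simp at hP
        obtain ⟨fB1, rfl⟩ : ∃ fB1, fB = fB1 + 1 + 1 := ⟨fB - 2, by omega⟩
        have h1 : runB n a b (n - 1, n - 1) (fB1 + 1 + 1) F V (k : Int)
            = runB n a b (n - 1, n - 1) (fB1 + 1) (buildNxt n a b F V)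
                (PySem.Set.union V (buildNxt n a b F V)) ((k : Int) + 1) := by
          rw [runB, if_neg hFne, if_neg (by simpa using htF)]
        rw [h1, hnxt, runB, if_pos rfl]
        simp
      | cons d0 D' =>
        -- layer transition: A consumes no step; B advances one level
        set D := d0 :: D' with hDdef
        set nxt := buildNxt n a b F V with hnxtdef
        have hnxtD : ∀ c, c ∈ nxt ↔ c ∈ D := by
          intro c
          rw [nxtmem c, hD c]
          constructor
          · rintro ⟨hv, hnV, p, hpF, hpm⟩
            rcases (hF p).mp hpF with hPd | hP
            · exact ⟨hv, hnV, p, hPd, hpm⟩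
            · simp at hP
          · rintro ⟨hv, hnV, p, hPd, hpm⟩
            exact ⟨hv, hnV, p, (hF p).mpr (Or.inl hPd), hpm⟩
        have hDnd : D.Nodup := by simpa using hPDnd
        have hperm : nxt.Perm D :=
          (List.perm_ext_iff_of_nodup nxtnd hDnd).mpr hnxtD
        have hnxtV : ∀ c ∈ nxt, c ∉ V := fun c hc => ((nxtmem c).mp hc).2.1
        set Vu := PySem.Set.union V nxt with hVudef
        have hVulen : Vu.length = V.length + D.length := by
          rw [hVudef, union_length V nxt hVnd nxtnd hnxtV, hperm.length_eq]
        have hVumem : ∀ c, c ∈ Vu ↔ (c ∈ V ∨ c ∈ D) := by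
          intro c
          rw [hVudef, PySem.Set.mem_union, hnxtD c]
        obtain ⟨fB1, rfl⟩ : ∃ fB1, fB = fB1 + 1 := ⟨fB - 1, by omega⟩
        have h1 : runB n a b (n - 1, n - 1) (fB1 + 1) F V (k : Int)
            = runB n a b (n - 1, n - 1) fB1 nxt Vu ((k : Int) + 1) := by
          rw [runB, if_neg hFne, if_neg (by simpa using htF)]
        rw [h1]
        have hcast : ((k : Int) + 1) = ((k + 1 : Nat) : Int) := by push_cast; ring
        rw [hcast]
        refine ih f fB1 (k + 1) D [] nxt Vu [] s (by omega) (by simpa using hsq) hsacc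
          (List.ne_nil_of_mem ((hnxtD d0).mpr List.mem_cons_self))
          nxtnd (PySem.Set.nodup_union V nxt hVnd) (by simpa using hDnd)
          (fun c => by rw [hnxtD c]; simp)
          (by simp)
          (fun c hc => by rw [hVumem c]; exact Or.inr ((hnxtD c).mp hc))
          (fun c hc => by
            rcases (hVumem c).mp hc with h | h
            · exact hVval c h
            · exact ((hD c).mp h).1)
          (fun c => by simp)
          (fun c hv => by
            rw [hvd c hv, hVumem c]
            constructor
            · rintro (h | h)
              · exact Or.inl (Or.inl h)
              · exact Or.inl (Or.inr h)
            · rintro (h | h)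
              · exact h
              · simp at h)
          (fun c hc => by rw [hwD c hc]; push_cast; ring)
          (fun c hc => by simp at hc)
          (fun h => by rcases (hVumem _).mp h with h' | h'; exacts [htV h', htD h'])
          (by simp)
          htw
          (by
            rw [hVulen]
            simpa using hfA)
          (by
            rw [hVulen]
            have : 1 ≤ D.length := by rw [hDdef]; simp
            omega)
    | cons x P' =>
      -- A pops x from the current layer and scans its eight neighbours
      obtain ⟨f1, rfl⟩ : ∃ f1, f = f1 + 1 := by
        refine ⟨f - 1, by_contra fun h => ?_⟩
        have : 1 ≤ ((x :: P') ++ D).length := by simp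
        omega
      have hxF : x ∈ F := (hF x).mpr (Or.inr List.mem_cons_self)
      have hxV : x ∈ V := hFV x hxF
      have hxval : validC n x := hVval x hxV
      have hxvd : s.vd.getD x false = false := (hvd x hxval).mpr (Or.inl hxV)
      have hxw : s.wd.getD x 0 = (k : Int) := hwP x List.mem_cons_self
      have hxPD : x ∉ P' ++ D ∧ (P' ++ D).Nodup := List.nodup_cons.mp (by simpa using hPDnd)
      set s0 : AState := { s with q := P' ++ D } with hs0
      set s1 : AState := procNbrs n x (n - 1, n - 1) (movesA a b x.1 x.2) s0 with hs1def
      have hrun : runA n a b (n - 1, n - 1) (f1 + 1) s = runA n a b (n - 1, n - 1) f1 s1 := by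
        rw [runA, hsq]; rfl
      obtain ⟨fr, hq, hfrnd, hmem, hvdi, hwf, hwo, hacc⟩ :=
        procNbrs_spec n (n - 1, n - 1) x (movesA a b x.1 x.2) s0 hxvd
      have hfrVD : ∀ c ∈ fr, c ∉ V ∧ c ∉ D := by
        intro c hc
        obtain ⟨hl, hv, ht⟩ := hmem c hc
        have : ¬(c ∈ V ∨ c ∈ D) := fun h => by
          rw [(hvd c hv).mpr h] at ht; exact Bool.false_ne_true ht
        exact ⟨fun h => this (Or.inl h), fun h => this (Or.inr h)⟩
      rcases hacc with ⟨htfr, hacc1⟩ | ⟨htfr, hacc1, hcomp⟩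
      · -- the target was discovered while scanning x: both sides answer k+1
        have hs1acc : s1.acc = [(k : Int) + 1] := by
          rw [hacc1]
          have h0 : s0.acc = [] := hsacc
          have h1 : s0.wd.getD x 0 = (k : Int) := hxw
          rw [h0, h1]
          simp
        have hs1vdt : s1.vd.getD (n - 1, n - 1) false = false := (hvdi _).mpr (Or.inr htfr)
        have hs1wdt : s1.wd.getD (n - 1, n - 1) 0 = (k : Int) + 1 := by
          have := hwf _ htfr
          rwa [(show s0.wd = s.wd from rfl), hxw] at this
        obtain ⟨ra, rw1, _⟩ := runA_preserve n a b (n - 1, n - 1) f1 s1 hs1vdt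
        rw [hrun, ra, rw1, hs1acc, hs1wdt, if_neg (by omega : ¬((k : Int) + 1 = 0))]
        have htnxt : (n - 1, n - 1) ∈ buildNxt n a b F V :=
          (nxtmem _).mpr ⟨htval, htV, x, hxF, (hmem _ htfr).1⟩
        obtain ⟨fB1, rfl⟩ : ∃ fB1, fB = fB1 + 1 + 1 := ⟨fB - 2, by omega⟩
        have h1 : runB n a b (n - 1, n - 1) (fB1 + 1 + 1) F V (k : Int)
            = runB n a b (n - 1, n - 1) (fB1 + 1) (buildNxt n a b F V)
                (PySem.Set.union V (buildNxt n a b F V)) ((k : Int) + 1) := by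
          rw [runB, if_neg hFne, if_neg (by simpa using htF)]
        have h2 : runB n a b (n - 1, n - 1) (fB1 + 1) (buildNxt n a b F V)
            (PySem.Set.union V (buildNxt n a b F V)) ((k : Int) + 1) = (k : Int) + 1 := by
          rw [runB, if_neg (List.ne_nil_of_mem htnxt), if_pos (by simpa using htnxt)]
        rw [h1, h2]
        simp
      · -- no target yet: x's fresh children join the next layer, induction continues
        have hP'F : ∀ c ∈ P', c ∈ F := fun c hc => (hF c).mpr (Or.inr (List.mem_cons_of_mem _ hc))
        have hDfr : ∀ c ∈ D, c ∉ fr := fun c hc hcf => (hfrVD c hcf).2 hc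
        have hP'fr : ∀ c ∈ P', c ∉ fr := fun c hc hcf => (hfrVD c hcf).1 (hFV c (hP'F c hc))
        obtain ⟨hP'nd, hDnd, hP'D⟩ := List.nodup_append.mp hxPD.2
        have hDfrnd : (D ++ fr).Nodup := by
          rw [List.nodup_append]
          exact ⟨hDnd, hfrnd, fun c hc c' hc' hcc => hDfr c hc (hcc ▸ hc')⟩
        have hPDnd' : (P' ++ (D ++ fr)).Nodup := by
          rw [List.nodup_append]
          refine ⟨hP'nd, hDfrnd, ?_⟩
          intro c hc c' hc' hcc
          rcases List.mem_append.mp hc' with h | h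
          · exact hP'D c hc c' h hcc
          · exact hP'fr c hc (hcc ▸ h)
        have hVDFle : V.length + (D.length + fr.length) ≤ n.toNat * n.toNat := by
          have hnd : ((V ++ D) ++ fr).Nodup := by
            rw [List.nodup_append]
            refine ⟨?_, hfrnd, ?_⟩
            · rw [List.nodup_append]
              exact ⟨hVnd, hDnd, fun c hc c' hc' hcc =>
                ((hD c').mp hc').2.1 (hcc ▸ hc)⟩
            · intro c hc c' hc' hcc
              rcases List.mem_append.mp hc with h | h
              · exact (hfrVD c' hc').1 (hcc ▸ h)
              · exact (hfrVD c' hc').2 (hcc ▸ h)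
          have hsub : ((V ++ D) ++ fr) ⊆ boardList n := by
            intro c hc
            rcases List.mem_append.mp hc with h | h
            · rcases List.mem_append.mp h with h' | h'
              · exact (mem_boardList n c).mpr (hVval c h')
              · exact (mem_boardList n c).mpr ((hD c).mp h').1
            · exact (mem_boardList n c).mpr (hmem c h).2.1
          have := (hnd.subperm hsub).length_le
          simp only [List.length_append, length_boardList n] at this
          omega
        rw [hrun]
        refine ih f1 fB k P' (D ++ fr) F V (Pd ++ [x]) s1 (by omega) ?_ ?_ hFne hFnd hVnd
          hPDnd' ?_ ?_ hFV hVval ?_ ?_ ?_ ?_ htV ?_ ?_ ?_ hfB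
        · rw [hs1def, hq, ← List.append_assoc]
        · rw [hs1def, hacc1]; exact hsacc
        · intro c
          rw [hF c]
          simp only [List.mem_append, List.mem_cons]
          tauto
        · intro c ⟨h1, h2⟩
          rcases List.mem_append.mp h1 with h | h
          · exact hPdP c ⟨h, List.mem_cons_of_mem _ h2⟩
          · rw [List.mem_singleton] at h
            exact hxPD.1 (List.mem_append_left _ (h ▸ h2))
        · intro c
          constructor
          · intro hc
            rcases List.mem_append.mp hc with h | h
            · obtain ⟨hv, hnV, p, hp, hpm⟩ := (hD c).mp h
              exact ⟨hv, hnV, p, List.mem_append_left _ hp, hpm⟩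
            · obtain ⟨hl, hv, ht⟩ := hmem c h
              exact ⟨hv, (hfrVD c h).1, x, List.mem_append_right _ (List.mem_singleton_self x), hl⟩
          · rintro ⟨hv, hnV, p, hp, hpm⟩
            rcases List.mem_append.mp hp with h | h
            · exact List.mem_append_left _ ((hD c).mpr ⟨hv, hnV, p, h, hpm⟩)
            · rw [List.mem_singleton] at h
              subst h
              by_cases hcD : c ∈ D
              · exact List.mem_append_left _ hcD
              · refine List.mem_append_right _ (hcomp c hpm hv ?_)
                have : ¬ (s.vd.getD c false = false) := fun hf =>
                  (fun h' => by rcases h' with h' | h'; exacts [hnV h', hcD h'])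
                    ((hvd c hv).mp hf)
                exact Bool.not_eq_false _ |>.mp this
        · intro c hv
          rw [hs1def, hvdi c]
          rw [hvd c hv]
          simp only [List.mem_append]
          tauto
        · intro c hc
          rw [hs1def, hwo c (hP'fr c hc)]
          exact hwP c (List.mem_cons_of_mem _ hc)
        · intro c hc
          rcases List.mem_append.mp hc with h | h
          · rw [hs1def, hwo c (hDfr c h)]
            exact hwD c h
          · rw [hs1def, hwf c h]
            have : s0.wd.getD x 0 = (k : Int) := hxw
            rw [this]
        · intro h
          rcases List.mem_append.mp h with h | h
          exacts [htD h, htfr h]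
        · rw [hs1def, hwo _ htfr]
          exact htw
        · simp only [List.length_append, List.length_cons] at hfA ⊢
          omega


-- initial states satisfy the invariant: one (a, b) round of A equals B's answer
lemma inner_eq (n a b : Int) (hn : 2 ≤ n) : innerA n a b = [innerB n a b] := by
  rw [innerA, innerB]
  have h := mainInv n a b hn (9 * n.toNat * n.toNat + 2 + (n.toNat * n.toNat + 2))
    (9 * n.toNat * n.toNat + 2) (n.toNat * n.toNat + 2) 0
    [((0 : Int), (0 : Int))] [] [((0 : Int), (0 : Int))] [((0 : Int), (0 : Int))] []
    ⟨[((0 : Int), (0 : Int))], (vInit n).insert ((0 : Int), (0 : Int)) false, wInit n, []⟩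
    (le_refl _) (by simp) rfl (by simp) (by simp) (by simp) (by simp)
    (fun c => by simp)
    (fun c h => by simp at h)
    (fun c hc => hc)
    (fun c hc => by
      rw [List.mem_singleton] at hc; subst hc
      exact ⟨by omega, by omega, by omega, by omega⟩)
    (fun c => by simp)
    (fun c hv => by
      show ((vInit n).insert ((0 : Int), (0 : Int)) false).getD c false = false ↔ _
      rw [PySem.Dict.getD_insert]
      by_cases hc : c = ((0 : Int), (0 : Int))
      · simp [hc]
      · rw [if_neg hc, vInit_getD n c hv]
        simp [hc])
    (fun c hc => by
      rw [List.mem_singleton] at hc; subst hc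
      show (wInit n).getD _ 0 = _
      rw [wInit_getD]
      simp)
    (fun c hc => by simp at hc)
    (by
      simp only [List.mem_singleton, Prod.mk.injEq]
      intro ⟨h1, h2⟩
      omega)
    (by simp)
    (by exact wInit_getD n _)
    (by
      simp only [List.length_append, List.length_cons, List.length_nil]
      have h9 : 9 * n.toNat * n.toNat = 9 * (n.toNat * n.toNat) := by ring
      omega)
    (by omega)
  simpa using h

lemma flatMap_singleton_eq_map {α β : Type} (l : List α) (f : α → List β) (g : α → β)
    (h : ∀ x ∈ l, f x = [g x]) : l.flatMap f = l.map g := by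
  induction l with
  | nil => rfl
  | cons a l ih =>
    rw [List.flatMap_cons, h a List.mem_cons_self,
      ih (fun x hx => h x (List.mem_cons_of_mem _ hx))]
    rfl

-- ===== VERDICT (by name: the statement is the Claim_ definition above) =====
theorem knightlOnAChessboard_spec : Claim_equal_knightlOnAChessboard := by
  intro n _
  show knightlOnAChessboard n = knightlOnAChessboard_alt n
  rw [knightlOnAChessboard, knightlOnAChessboard_alt]
  apply List.map_congr_left
  intro a ha
  have hn : 2 ≤ n := by
    have := (PySem.List.mem_pyRange_one).mp ha
    omega
  rw [PySem.List.foldl_append_eq_flatMap, List.nil_append]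
  exact flatMap_singleton_eq_map _ _ _ (fun b _ => inner_eq n a b hn)
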